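-- pv_equiv track=rewrite | github.com/the-cat-crying/zp_code | untitled/Text_processing/dispatch.py | write_bus
-- ===== SOURCE A (Python) =====
-- def write_bus(aprons_t, plain_s, bus_all):
--     for index, apron in enumerate(aprons_t[0]):
--         if plain_s == apron:
--             for b_car in aprons_t[1:]:
--                 for g in bus_all:
--                     if b_car[0] == g[1]:
--                         g[3] = b_car[index]
--     return bus_all
-- ===== SOURCE B (Python) =====
-- def write_bus(aprons_t, plain_s, bus_all):
--     # last header index matching plain_s (mirrors A: later matches override earlier ones)
--     idx = None
--     for i, h in enumerate(aprons_t[0]):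
--         if h == plain_s:
--             idx = i
--     if idx is None or not bus_all:
--         return bus_all
--     rows = aprons_t[1:]
--     if not rows:
--         return bus_all
--     # index the data rows by their key; later rows overwrite (last-row-wins)
--     table = {}
--     for row in rows:
--         table[row[0]] = row
--     for g in bus_all:
--         row = table.get(g[1])
--         if row is not None:
--             g[3] = row[idx]
--     return bus_all
-- ===== Notes on version B (the rewrite author's own statement) =====
-- stated objective: alternative
-- what changed: Replaces the triple-nested scan (every matching header index x every data row x every bus row) by: find the last matching header index, build a dict of rows keyed by row[0] once (last row wins), then a single pass over bus_all.
import Mathlib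
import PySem

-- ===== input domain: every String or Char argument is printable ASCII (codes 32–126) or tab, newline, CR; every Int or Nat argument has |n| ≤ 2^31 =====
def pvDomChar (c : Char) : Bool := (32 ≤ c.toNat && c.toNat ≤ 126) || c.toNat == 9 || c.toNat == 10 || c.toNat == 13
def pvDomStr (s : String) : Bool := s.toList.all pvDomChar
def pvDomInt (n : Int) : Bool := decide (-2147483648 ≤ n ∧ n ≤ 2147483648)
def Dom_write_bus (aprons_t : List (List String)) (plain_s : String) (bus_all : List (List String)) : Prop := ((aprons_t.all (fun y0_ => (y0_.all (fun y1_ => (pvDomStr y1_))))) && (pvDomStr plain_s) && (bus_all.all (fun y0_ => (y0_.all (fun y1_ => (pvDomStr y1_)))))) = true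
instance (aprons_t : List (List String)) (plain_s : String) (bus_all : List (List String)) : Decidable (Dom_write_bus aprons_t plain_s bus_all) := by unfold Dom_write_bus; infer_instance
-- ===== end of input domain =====

-- B replaces A's triple-nested scan by last-matching-index + a dict of rows + one pass over bus_all;
-- both versions mutate the rows of bus_all in place in Python — equivalence here is about the
-- returned value (which is bus_all itself).

-- ===== PORT A =====
-- g[3] = v is ported as List.set 3 (out of range Python raises, excluded by Pre_; List.set is a no-op there);
-- b_car[0], g[1], b_car[index] are ported with headD ""/getD/pyGetD (in range on Pre_, default "" outside).
def write_bus (aprons_t : List (List String)) (plain_s : String) (bus_all : List (List String)) : List (List String) :=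
  (PySem.List.enumerate (aprons_t.headD []) 0).foldl
    (fun bus1 p =>
      if plain_s == p.2 then
        aprons_t.tail.foldl
          (fun bus2 b_car =>
            bus2.map (fun g =>
              if b_car.headD "" == g.getD 1 "" then g.set 3 (PySem.List.pyGetD b_car p.1 "") else g))
          bus1
      else bus1)
    bus_all

-- ===== PORT B =====
def write_bus_alt (aprons_t : List (List String)) (plain_s : String) (bus_all : List (List String)) : List (List String) :=
  let idx : Option Int :=
    (PySem.List.enumerate (aprons_t.headD []) 0).foldl
      (fun acc p => if p.2 == plain_s then some p.1 else acc) none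
  match idx with
  | none => bus_all
  | some i =>
    if bus_all.isEmpty then bus_all
    else
      let rows := aprons_t.tail
      if rows.isEmpty then bus_all
      else
        let table : PySem.Dict String (List String) :=
          rows.foldl (fun d row => d.insert (row.headD "") row) PySem.Dict.empty
        bus_all.map (fun g =>
          match table.get? (g.getD 1 "") with
          | some row => g.set 3 (PySem.List.pyGetD row i "")
          | none => g)

-- ===== PRECONDITION & SPEC =====
-- Pre_ excludes exactly the inputs where the Python A raises IndexError: empty aprons_t, and —
-- when bus_all is nonempty and some header cell equals plain_s — empty data rows, bus rows shorter
-- than 2, and (on a key match) data rows shorter than the matching index or bus rows shorter than 4.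
def Pre_write_bus (aprons_t : List (List String)) (plain_s : String) (bus_all : List (List String)) : Prop :=
  aprons_t ≠ [] ∧
  (bus_all ≠ [] →
    ∀ i : Fin (aprons_t.headD []).length, (aprons_t.headD []).get i = plain_s →
      ∀ r ∈ aprons_t.tail, r ≠ [] ∧
        ∀ g ∈ bus_all, 2 ≤ g.length ∧
          (r.headD "" = g.getD 1 "" → (i : Nat) < r.length ∧ 4 ≤ g.length))
instance (aprons_t : List (List String)) (plain_s : String) (bus_all : List (List String)) : Decidable (Pre_write_bus aprons_t plain_s bus_all) := by unfold Pre_write_bus; infer_instance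

def pvWitness_write_bus : List (List String) × String × List (List String) :=
  ([["h"], ["k", "v"]], "h", [["x", "k", "y", "z"]])

def Spec_write_bus (aprons_t : List (List String)) (plain_s : String) (bus_all : List (List String)) (out : List (List String)) : Prop := out = write_bus_alt aprons_t plain_s bus_all
instance (aprons_t : List (List String)) (plain_s : String) (bus_all : List (List String)) (out : List (List String)) : Decidable (Spec_write_bus aprons_t plain_s bus_all out) := by unfold Spec_write_bus; infer_instance

-- ===== CLAIM (what is proved, stated in full; the proofs are below) =====
def Claim_equal_write_bus : Prop := ∀ (aprons_t : List (List String)) (plain_s : String) (bus_all : List (List String)), Dom_write_bus aprons_t plain_s bus_all → Pre_write_bus aprons_t plain_s bus_all → Spec_write_bus aprons_t plain_s bus_all (write_bus aprons_t plain_s bus_all)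

-- ===== LEMMAS AND PROOFS =====

-- the effect of one full data-row pass (at header index i) on a single bus row g
def rowEff (rows : List (List String)) (i : Int) (g : List String) : List String :=
  match rows.reverse.find? (fun r => r.headD "" == g.getD 1 "") with
  | some r => g.set 3 (PySem.List.pyGetD r i "")
  | none => g

theorem getD_set_three (g : List String) (v : String) :
    (g.set 3 v).getD 1 "" = g.getD 1 "" := by
  simp [List.getD, List.getElem?_set_ne]

-- B's dict lookup computes the last data row whose key matches
theorem table_get?_eq (rows : List (List String)) (k : String) :
    (rows.foldl (fun d row => d.insert (row.headD "") row) PySem.Dict.empty).get? k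
      = rows.reverse.find? (fun r => r.headD "" == k) := by
  induction rows using List.reverseRecOn with
  | nil => simp [PySem.Dict.get?_empty]
  | append_singleton rs r ih =>
    rw [List.foldl_append, List.reverse_append]
    simp only [List.foldl_cons, List.foldl_nil, List.reverse_singleton, List.singleton_append,
      List.find?_cons]
    rw [PySem.Dict.get?_insert]
    by_cases h : r.headD "" == k
    · simp only [h]
      rw [if_pos (by exact (beq_iff_eq.mp h).symm)]
    · simp only [h]
      rw [if_neg (fun he => h (beq_iff_eq.mpr he.symm)), ih]

-- one data-row pass of A (at header index i) maps every bus row by rowEff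
theorem pass_eq_map (rows : List (List String)) (i : Int) (bus : List (List String)) :
    rows.foldl
      (fun bus2 b_car =>
        bus2.map (fun g =>
          if b_car.headD "" == g.getD 1 "" then g.set 3 (PySem.List.pyGetD b_car i "") else g))
      bus
    = bus.map (rowEff rows i) := by
  induction rows generalizing bus with
  | nil =>
    simp only [List.foldl_nil]
    conv_lhs => rw [← List.map_id bus]
    apply List.map_congr_left
    intro g _
    simp [rowEff]
  | cons r rs ih =>
    rw [List.foldl_cons, ih, List.map_map]
    apply List.map_congr_left
    intro g _
    simp only [Function.comp_apply]
    by_cases h : r.headD "" == g.getD 1 ""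
    · rw [if_pos h]
      unfold rowEff
      rw [getD_set_three, List.reverse_cons, List.find?_append]
      cases hf : rs.reverse.find? (fun r' => r'.headD "" == g.getD 1 "") with
      | none => simp only [Option.none_or, List.find?_cons, h]
      | some r' => simp only [Option.some_or, List.set_set]
    · rw [if_neg h]
      unfold rowEff
      rw [List.reverse_cons, List.find?_append]
      cases hf : rs.reverse.find? (fun r' => r'.headD "" == g.getD 1 "") with
      | none =>
        simp only [Option.none_or, List.find?_cons]
        simp only [Bool.not_eq_true] at h
        rw [h]
        rfl
      | some r' => simp only [Option.some_or]

-- applying a later pass after any earlier pass leaves only the later pass's effect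
theorem rowEff_rowEff (rows : List (List String)) (i j : Int) (g : List String) :
    rowEff rows j (rowEff rows i g) = rowEff rows j g := by
  unfold rowEff
  cases h : rows.reverse.find? (fun r => r.headD "" == g.getD 1 "") with
  | none => simp only [h]
  | some r => simp only [h, getD_set_three, List.set_set]

-- A's whole loop, characterised by the last matching header index
theorem A_loop_eq (rows : List (List String)) (plain_s : String) (bus : List (List String))
    (l : List (Int × String)) :
    l.foldl
      (fun bus1 p =>
        if plain_s == p.2 then
          rows.foldl
            (fun bus2 b_car =>
              bus2.map (fun g =>
                if b_car.headD "" == g.getD 1 "" then g.set 3 (PySem.List.pyGetD b_car p.1 "") else g))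
            bus1
        else bus1)
      bus
    = match l.foldl (fun acc p => if p.2 == plain_s then some p.1 else acc) (none : Option Int) with
      | none => bus
      | some i => bus.map (rowEff rows i) := by
  induction l using List.reverseRecOn with
  | nil => simp
  | append_singleton l' p ih =>
    rw [List.foldl_append, List.foldl_append, ih]
    simp only [List.foldl_cons, List.foldl_nil]
    by_cases h : plain_s == p.2
    · have h2 : (p.2 == plain_s) = true := beq_iff_eq.mpr (beq_iff_eq.mp h).symm
      rw [if_pos h, h2]
      simp only [if_true]
      cases hl : l'.foldl (fun acc p => if p.2 == plain_s then some p.1 else acc) (none : Option Int) with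
      | none => rw [pass_eq_map]
      | some i =>
        rw [pass_eq_map, List.map_map]
        apply List.map_congr_left
        intro g _
        exact rowEff_rowEff rows i p.1 g
    · have h2 : (p.2 == plain_s) = false := by
        cases hb : p.2 == plain_s
        · rfl
        · exact absurd (beq_iff_eq.mpr (beq_iff_eq.mp hb).symm) (by simp [h])
      rw [if_neg (by simp [h]), h2]
      simp

-- ports agree on every input (Pre_ is needed only for faithfulness to the Python, not here)
theorem ports_agree (aprons_t : List (List String)) (plain_s : String) (bus_all : List (List String)) :
    write_bus aprons_t plain_s bus_all = write_bus_alt aprons_t plain_s bus_all := by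
  unfold write_bus write_bus_alt
  rw [A_loop_eq]
  cases hl : (PySem.List.enumerate (aprons_t.headD []) 0).foldl
      (fun acc p => if p.2 == plain_s then some p.1 else acc) (none : Option Int) with
  | none => simp
  | some i =>
    simp only
    by_cases hb : bus_all.isEmpty
    · rw [if_pos hb]
      rw [List.isEmpty_iff.mp hb]
      simp
    · rw [if_neg hb]
      by_cases hr : aprons_t.tail.isEmpty
      · rw [if_pos hr]
        rw [List.isEmpty_iff.mp hr]
        trans (bus_all.map id)
        · apply List.map_congr_left
          intro g _
          simp [rowEff]
        · exact List.map_id bus_all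
      · rw [if_neg hr]
        apply List.map_congr_left
        intro g _
        rw [table_get?_eq]
        unfold rowEff
        cases hf : aprons_t.tail.reverse.find? (fun r => r.headD "" == g.getD 1 "") <;> simp only []

-- ===== VERDICT (by name: the statement is the Claim_ definition above) =====
theorem write_bus_spec : Claim_equal_write_bus := by
  intro aprons_t plain_s bus_all _ _
  unfold Spec_write_bus
  exact ports_agree aprons_t plain_s bus_all
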